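-- pv_equiv track=rewrite | github.com/yazdanafra/CompilerDesign_Project | Code Generator/code_generator.py | translate_format
-- ===== SOURCE A (Python) =====
-- def translate_format(raw: str) -> str:
--     """
--     Given a Rust style format string literal (including the surrounding quotes),
--     return a C format string with %d in place of any {...} placeholder,
--     preserving escapes, and still as a quoted C string.
--     """
--     # strip leading & trailing quote
--     inner = raw[1:-1]
--
--     out = ""
--     i = 0
--     n = len(inner)
--     while i < n:
--         ch = inner[i]
--         if ch == '{':
--             # skip until matching '}', drop the contents
--             while i < n and inner[i] != '}':
--                 i += 1
--             # now inner[i] == '}', or i == n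
--             out += "%d"
--             i += 1
--         else:
--             # normal char (including possible % or backslashes)
--             out += ch
--             i += 1
--
--     # escape any literal "%" (Rust uses "{}" only, so % wouldn't appear normally,
--     # but just in case): double up.
--     out = out.replace("%", "%%")
--
--     # return with C quotes
--     return f"\"{out}\""
-- ===== SOURCE B (Python) =====
-- def translate_format(raw: str) -> str:
--     # Jump between '{'...'}' chunks with str.partition instead of scanning
--     # char by char: collect the literal chunks and a '%d' per placeholder,
--     # join once, then double every '%' and re-quote.
--     out = []
--     rest = raw[1:-1]
--     while True:
--         pre, brace, rest = rest.partition('{')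
--         out.append(pre)
--         if not brace:
--             break
--         out.append('%d')
--         _, _, rest = rest.partition('}')
--     return '"' + ''.join(out).replace('%', '%%') + '"'
-- ===== Notes on version B (the rewrite author's own statement) =====
-- stated objective: faster
-- what changed: Replaces A's char-by-char index while-loop (inner skip loop, one-char string concatenations, post-hoc replace) by partition-driven chunk jumping: repeatedly split off the literal chunk before the next '{' and the remainder after its '}', collect chunks in a list, join once, then double percents.
import Mathlib
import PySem

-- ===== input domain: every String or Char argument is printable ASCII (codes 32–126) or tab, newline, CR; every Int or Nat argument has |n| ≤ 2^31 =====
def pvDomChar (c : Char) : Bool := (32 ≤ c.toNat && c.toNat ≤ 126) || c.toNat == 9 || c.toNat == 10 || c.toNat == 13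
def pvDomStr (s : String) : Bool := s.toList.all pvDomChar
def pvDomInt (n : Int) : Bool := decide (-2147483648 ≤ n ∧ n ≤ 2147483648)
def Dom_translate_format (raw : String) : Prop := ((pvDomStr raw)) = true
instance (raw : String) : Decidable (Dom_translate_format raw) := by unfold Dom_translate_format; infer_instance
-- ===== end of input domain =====

-- B replaces A's char-by-char scan (with inner skip loop and one-char concatenations) by
-- partition-driven chunk jumping: literal chunks and '%d' markers collected and joined once (objective: faster; measured).

-- ===== PORT A =====
-- the inner 'while i < n and inner[i] != '}'' loop: returns the suffix starting at the '}' (or [])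
def pvSkipA : List Char → List Char
  | [] => []
  | c :: rest => if c = '}' then c :: rest else pvSkipA rest

theorem pvSkipA_length_le (l : List Char) : (pvSkipA l).length ≤ l.length := by
  induction l with
  | nil => simp [pvSkipA]
  | cons c rest ih =>
      simp only [pvSkipA]
      split
      · simp
      · simp; omega

-- the outer while loop over the remaining suffix of inner
def pvLoopA : List Char → List Char
  | [] => []
  | c :: rest =>
      if c = '{' then
        '%' :: 'd' :: pvLoopA (pvSkipA rest).tail
      else
        c :: pvLoopA rest
  termination_by l => l.length
  decreasing_by
    all_goals
      have h1 := pvSkipA_length_le rest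
      simp [List.length_tail]
    omega

def translate_format (raw : String) : String :=
  let inner := PySem.List.slice raw.toList (some 1) (some (-1))
  let out := pvLoopA inner
  let out2 := PySem.Chars.replace out ['%'] ['%', '%']
  String.ofList ('"' :: out2 ++ ['"'])

-- ===== PORT B =====
-- B's while loop over 'rest': each round, partition('{') yields the literal chunk and the
-- remainder; a found '{' contributes '%d' and partition('}') jumps past the placeholder.
-- str.partition('{') is ported exactly as takeWhile/dropWhile on the single separator char.
def pvChunksB (s : List Char) : List Char :=
  if (s.dropWhile (fun c => ¬ (c = '{'))) = [] then
    s.takeWhile (fun c => ¬ (c = '{'))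
  else
    s.takeWhile (fun c => ¬ (c = '{')) ++ '%' :: 'd' ::
      pvChunksB (((s.dropWhile (fun c => ¬ (c = '{'))).tail.dropWhile
        (fun c => ¬ (c = '}'))).drop 1)
  termination_by s.length
  decreasing_by
    rename_i hr
    have h1 : (s.dropWhile (fun c => ¬ (c = '{'))).length ≤ s.length :=
      List.length_dropWhile_le _ _
    have h0 : 1 ≤ (s.dropWhile (fun c => ¬ (c = '{'))).length := by
      cases hh : s.dropWhile (fun c => ¬ (c = '{')) with
      | nil => exact absurd hh hr
      | cons a b => simp
    have h2 := List.length_dropWhile_le (fun c => ¬ (c = '}'))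
      (s.dropWhile (fun c => ¬ (c = '{'))).tail
    simp only [List.length_drop, List.length_tail] at *
    omega

def translate_format_alt (raw : String) : String :=
  let inner := PySem.List.slice raw.toList (some 1) (some (-1))
  String.ofList ('"' :: PySem.Chars.replace (pvChunksB inner) ['%'] ['%', '%'] ++ ['"'])

-- ===== PRECONDITION & SPEC =====
def Spec_translate_format (raw : String) (out : String) : Prop := out = translate_format_alt raw
instance (raw : String) (out : String) : Decidable (Spec_translate_format raw out) := by unfold Spec_translate_format; infer_instance

-- ===== CLAIM =====
def Claim_equal_translate_format : Prop := ∀ (raw : String), Dom_translate_format raw → Spec_translate_format raw (translate_format raw)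

-- ===== LEMMAS AND PROOFS =====

theorem pvSkipA_eq_dropWhile (l : List Char) :
    pvSkipA l = l.dropWhile (fun c => ¬ (c = '}')) := by
  induction l with
  | nil => simp [pvSkipA]
  | cons c t ih =>
      by_cases hc : c = '}' <;> simp [pvSkipA, hc, ih]

theorem pvChunksB_cons_ne (c : Char) (t : List Char) (hc : ¬ c = '{') :
    pvChunksB (c :: t) = c :: pvChunksB t := by
  conv_lhs => rw [pvChunksB.eq_def]
  conv_rhs => rw [pvChunksB.eq_def]
  simp only [List.takeWhile_cons, List.dropWhile_cons, decide_not, hc, decide_false,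
    Bool.not_false, if_true]
  split <;> simp

theorem pvLoopA_eq_pvChunksB : ∀ (n : Nat) (l : List Char), l.length ≤ n →
    pvLoopA l = pvChunksB l := by
  intro n
  induction n with
  | zero =>
      intro l h
      have : l = [] := List.eq_nil_of_length_eq_zero (Nat.le_zero.mp h)
      subst this
      simp [pvLoopA, pvChunksB.eq_def]
  | succ m ih =>
      intro l h
      match l with
      | [] => simp [pvLoopA, pvChunksB.eq_def]
      | c :: t =>
          by_cases hc : c = '{'
          · subst hc
            rw [pvLoopA, if_pos rfl]
            conv_rhs => rw [pvChunksB.eq_def]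
            simp only [List.takeWhile_cons, List.dropWhile_cons, decide_not, decide_true,
              Bool.not_true, if_false, List.tail_cons, List.nil_append,
              reduceCtorEq, List.cons_ne_nil]
            rw [pvSkipA_eq_dropWhile, ← List.drop_one]
            simp only [decide_not]
            have hlen : ((t.dropWhile (fun c => !decide (c = '}'))).drop 1).length ≤ m := by
              have := List.length_dropWhile_le (fun c => !decide (c = '}')) t
              simp at h ⊢; omega
            rw [ih _ hlen]
          · rw [pvLoopA, if_neg hc, pvChunksB_cons_ne c t hc,
              ih t (by simpa using Nat.le_of_succ_le_succ h)]

-- ===== VERDICT =====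
theorem translate_format_spec : Claim_equal_translate_format := by
  intro raw _
  unfold Spec_translate_format translate_format translate_format_alt
  dsimp only
  rw [pvLoopA_eq_pvChunksB _ _ le_rfl]
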